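/-
  THE CONTRACTS OF THE DECODER'S CONTEXT-FREE LEAVES (c/stb_vorbis_fixed.c; design/CONTRACTS.md entries 24, 25, 52, 78, 79, 89,
  109): `Spec`s over the shadow layer only — no decoder invariant. Ghost parameters of every Spec that touches memory: `others`,
  `frames` (the live objects of the shadow invariant).
-/
import Vorbis.Spec.Basic
import Vorbis.Fields.Offsets
namespace Vorbis.Spec
open X86 X86.User Asan

/-- **`error(rdi = f, esi = e)`** (CONTRACTS 24; OB1: `*f` is a live object of `sizeof(stb_vorbis)` bytes): stores `e` into
`f->error` (offset 140), returns 0 in eax (so rax = 0). Writes `[f + 140, f + 144)` and its own 48 bytes of stack (two pushes,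
`sub rsp, 8`, the return address of its check call, that routine's worst case); no shadow byte is written. -/
def error.spec (others : List Obj) (frames : List (Nat × FrameLayout)) : Spec where
  pre u :=
    ShadowPre others frames u ∧
    LiveIn others frames (u.reg .rdi).toNat Off.sizeof.stb_vorbis
  post u v :=
    v.reg .rax = 0 ∧
    ShadowUntouched u.mem v.mem ∧
    v.mem.readLE (u.reg .rdi + 140) 4 = (u.reg .rsi).toNat % 2 ^ 32
  frame := 48
  writes u := [⟨(u.reg .rdi).toNat + Off.stb_vorbis.error, (u.reg .rdi).toNat + Off.stb_vorbis.error + 4⟩]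

@[vspec] theorem error.spec_frame (others : List Obj) (frames : List (Nat × FrameLayout)) :
    (error.spec others frames).frame = 48 := id rfl

@[vspec] theorem error.spec_writes (others : List Obj) (frames : List (Nat × FrameLayout)) (u : State) :
    (error.spec others frames).writes u = [⟨(u.reg .rdi).toNat + 140, (u.reg .rdi).toNat + 140 + 4⟩] := id rfl

end Vorbis.Spec
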